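-- pv_equiv track=rewrite | github.com/craigfisher-dev/mlb-game-schedule-analyzer | app.py | trim_empty_weeks
-- ===== SOURCE A (Python) =====
-- def trim_empty_weeks(month_data, trim_start=False, trim_end=False):
--     result = month_data[:]
--
--     # Trim leading weeks with no games
--     if trim_start:
--         while result and all(opponent is None for day_num, opponent, is_home in result[0]):
--             result = result[1:]
--
--     # Trim trailing weeks with no games
--     if trim_end:
--         while result and all(opponent is None for day_num, opponent, is_home in result[-1]):
--             result = result[:-1]
--
--     return result
-- ===== SOURCE B (Python) =====
-- def trim_empty_weeks(month_data, trim_start=False, trim_end=False):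
--     # One pass: collect indices of weeks that contain at least one game,
--     # then return a single slice of month_data.
--     nonempty = [i for i, week in enumerate(month_data)
--                 if any(opponent is not None for day_num, opponent, is_home in week)]
--     if not nonempty and (trim_start or trim_end):
--         return []
--     start = nonempty[0] if trim_start else 0
--     end = nonempty[-1] + 1 if trim_end else len(month_data)
--     return month_data[start:end]
-- ===== Notes on version B (the rewrite author's own statement) =====
-- stated objective: simpler
-- what changed: Replaces A's two while-loops of repeated end-reslices (result[1:]/result[:-1]) by one enumerate pass collecting the indices of non-empty weeks, then returns a single slice month_data[start:end].
import Mathlib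
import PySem

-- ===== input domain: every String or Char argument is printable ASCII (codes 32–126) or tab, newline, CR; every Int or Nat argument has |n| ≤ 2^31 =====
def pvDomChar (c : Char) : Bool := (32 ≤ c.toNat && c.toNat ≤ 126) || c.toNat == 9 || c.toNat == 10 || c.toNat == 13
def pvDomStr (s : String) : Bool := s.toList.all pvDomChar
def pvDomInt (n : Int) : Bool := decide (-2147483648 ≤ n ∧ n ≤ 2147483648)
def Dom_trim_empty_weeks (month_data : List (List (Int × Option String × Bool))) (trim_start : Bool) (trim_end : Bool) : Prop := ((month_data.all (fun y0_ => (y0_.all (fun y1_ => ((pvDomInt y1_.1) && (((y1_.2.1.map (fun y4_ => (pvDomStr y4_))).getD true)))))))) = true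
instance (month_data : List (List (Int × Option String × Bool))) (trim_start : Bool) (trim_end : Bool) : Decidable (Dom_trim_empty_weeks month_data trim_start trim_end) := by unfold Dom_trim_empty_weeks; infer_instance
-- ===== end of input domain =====

-- B replaces A's two while-loops of repeated end-reslices by one index-collecting pass and a single slice (objective: simpler).

-- ===== PORT A =====
-- all(opponent is None for day_num, opponent, is_home in week)
def pvWeekEmpty (w : List (Int × Option String × Bool)) : Bool :=
  w.all (fun d => d.2.1.isNone)

-- while result and all(... result[0]): result = result[1:]
def pvTrimStartLoop : List (List (Int × Option String × Bool)) → List (List (Int × Option String × Bool))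
  | [] => []
  | w :: ws => if pvWeekEmpty w then pvTrimStartLoop ws else w :: ws

-- while result and all(... result[-1]): result = result[:-1]
def pvTrimEndLoop (l : List (List (Int × Option String × Bool))) : List (List (Int × Option String × Bool)) :=
  if hne : l = [] then l
  else if pvWeekEmpty (l.getLast hne) then pvTrimEndLoop l.dropLast else l
termination_by l.length
decreasing_by
  simpa [List.length_dropLast] using Nat.sub_lt (List.length_pos_iff.mpr hne) one_pos

def trim_empty_weeks (month_data : List (List (Int × Option String × Bool))) (trim_start : Bool) (trim_end : Bool) : List (List (Int × Option String × Bool)) :=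
  let result := month_data
  let result := if trim_start then pvTrimStartLoop result else result
  let result := if trim_end then pvTrimEndLoop result else result
  result

-- ===== PORT B =====
-- any(opponent is not None for day_num, opponent, is_home in week)
def pvWeekHasGame (w : List (Int × Option String × Bool)) : Bool :=
  w.any (fun d => d.2.1.isSome)

def trim_empty_weeks_alt (month_data : List (List (Int × Option String × Bool))) (trim_start : Bool) (trim_end : Bool) : List (List (Int × Option String × Bool)) :=
  -- nonempty = [i for i, week in enumerate(month_data) if any(...)]
  let nonempty : List Int := (PySem.List.enumerate month_data).filterMap
    (fun p => if pvWeekHasGame p.2 then some p.1 else none)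
  if nonempty.isEmpty && (trim_start || trim_end) then []
  else
    -- nonempty[0] / nonempty[-1]: only read under the flag; the guard ensures the list
    -- is nonempty whenever a flag is set, so headD/getLastD are exact here
    let start : Int := if trim_start then nonempty.headD 0 else 0
    let stop : Int := if trim_end then nonempty.getLastD 0 + 1 else (month_data.length : Int)
    PySem.List.slice month_data (some start) (some stop)

-- ===== PRECONDITION & SPEC =====
def Spec_trim_empty_weeks (month_data : List (List (Int × Option String × Bool))) (trim_start : Bool) (trim_end : Bool) (out : List (List (Int × Option String × Bool))) : Prop := out = trim_empty_weeks_alt month_data trim_start trim_end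
instance (month_data : List (List (Int × Option String × Bool))) (trim_start : Bool) (trim_end : Bool) (out : List (List (Int × Option String × Bool))) : Decidable (Spec_trim_empty_weeks month_data trim_start trim_end out) := by unfold Spec_trim_empty_weeks; infer_instance

-- ===== CLAIM (what is proved, stated in full; the proofs are below) =====
def Claim_equal_trim_empty_weeks : Prop := ∀ (month_data : List (List (Int × Option String × Bool))) (trim_start : Bool) (trim_end : Bool), Dom_trim_empty_weeks month_data trim_start trim_end → Spec_trim_empty_weeks month_data trim_start trim_end (trim_empty_weeks month_data trim_start trim_end)

-- ===== LEMMAS AND PROOFS =====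

-- the index list B builds, generalized over the enumeration start
def pvIdx (l : List (List (Int × Option String × Bool))) (s : Int) : List Int :=
  (PySem.List.enumerate l s).filterMap (fun p => if pvWeekHasGame p.2 then some p.1 else none)

lemma pvWeekHasGame_eq (w : List (Int × Option String × Bool)) :
    pvWeekHasGame w = !pvWeekEmpty w := by
  induction w with
  | nil => rfl
  | cons d ds ih => cases h : d.2.1 <;> simp [pvWeekHasGame, pvWeekEmpty, h] <;>
      simpa [pvWeekHasGame, pvWeekEmpty] using ih

lemma pvIdx_nil (s : Int) : pvIdx [] s = [] := rfl

lemma pvIdx_cons (w : List (Int × Option String × Bool)) (ws : List (List (Int × Option String × Bool))) (s : Int) :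
    pvIdx (w :: ws) s = if pvWeekEmpty w then pvIdx ws (s+1) else s :: pvIdx ws (s+1) := by
  simp only [pvIdx, PySem.List.enumerate_cons, List.filterMap_cons, pvWeekHasGame_eq]
  cases h : pvWeekEmpty w <;> simp [h]

lemma pvIdx_eq_nil_iff (l : List (List (Int × Option String × Bool))) (s : Int) :
    pvIdx l s = [] ↔ l.all pvWeekEmpty = true := by
  induction l generalizing s with
  | nil => simp [pvIdx_nil]
  | cons w ws ih =>
    rw [pvIdx_cons]
    by_cases h : pvWeekEmpty w = true <;> simp [h, ih]

lemma takeWhile_length_lt {α : Type} (p : α → Bool) (l : List α) (h : ¬ l.all p = true) :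
    (l.takeWhile p).length < l.length := by
  induction l with
  | nil => simp at h
  | cons a l ih =>
    by_cases ha : p a = true
    · simp [List.takeWhile_cons, ha] at h ⊢
      exact ih (by simpa [ha] using h)
    · simp [List.takeWhile_cons, ha]

lemma pvIdx_headD (l : List (List (Int × Option String × Bool))) (s : Int)
    (h : pvIdx l s ≠ []) :
    (pvIdx l s).headD 0 = s + ((l.takeWhile pvWeekEmpty).length : Int) := by
  induction l generalizing s with
  | nil => simp [pvIdx_nil] at h
  | cons w ws ih =>
    rw [pvIdx_cons] at h ⊢
    by_cases hw : pvWeekEmpty w = true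
    · simp only [hw, if_true] at h ⊢
      rw [ih (s+1) h]
      simp [List.takeWhile_cons, hw]
      push_cast
      ring
    · simp [hw, List.takeWhile_cons]

lemma pvIdx_concat (l : List (List (Int × Option String × Bool))) (w : List (Int × Option String × Bool)) (s : Int) :
    pvIdx (l ++ [w]) s = pvIdx l s ++ (if pvWeekEmpty w then [] else [s + (l.length : Int)]) := by
  induction l generalizing s with
  | nil =>
    rw [List.nil_append, pvIdx_cons, pvIdx_nil, pvIdx_nil]
    cases pvWeekEmpty w <;> simp
  | cons x xs ih =>
    rw [List.cons_append, pvIdx_cons, pvIdx_cons, ih (s+1)]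
    cases pvWeekEmpty x <;> cases pvWeekEmpty w <;> simp <;> omega

lemma pvIdx_getLastD (l : List (List (Int × Option String × Bool))) (s : Int)
    (h : pvIdx l s ≠ []) :
    (pvIdx l s).getLastD 0 = s + (l.length : Int) - 1 - ((l.reverse.takeWhile pvWeekEmpty).length : Int) := by
  induction l using List.reverseRecOn generalizing s with
  | nil => simp [pvIdx_nil] at h
  | append_singleton xs w ih =>
    rw [pvIdx_concat] at h ⊢
    by_cases hw : pvWeekEmpty w = true
    · simp only [hw, if_true, List.append_nil] at h ⊢
      rw [ih s h]
      simp [List.takeWhile_cons, hw]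
      push_cast
      ring
    · simp [hw, List.takeWhile_cons]
      push_cast
      ring

lemma trimStartLoop_eq (l : List (List (Int × Option String × Bool))) :
    pvTrimStartLoop l = l.drop (l.takeWhile pvWeekEmpty).length := by
  induction l with
  | nil => rfl
  | cons w ws ih =>
    by_cases hw : pvWeekEmpty w = true <;>
      simp [pvTrimStartLoop, hw, List.takeWhile_cons, ih]

lemma trimEndLoop_eq (l : List (List (Int × Option String × Bool))) :
    pvTrimEndLoop l = l.take (l.length - (l.reverse.takeWhile pvWeekEmpty).length) := by
  induction l using List.reverseRecOn with
  | nil => rw [pvTrimEndLoop]; rfl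
  | append_singleton xs w ih =>
    rw [pvTrimEndLoop, dif_neg (by simp), List.getLast_concat]
    by_cases hw : pvWeekEmpty w = true
    · simp only [hw, if_true, List.dropLast_concat]
      rw [ih]
      have hlen : xs.length - (xs.reverse.takeWhile pvWeekEmpty).length ≤ xs.length := Nat.sub_le _ _
      have hK : (xs ++ [w]).length - ((xs ++ [w]).reverse.takeWhile pvWeekEmpty).length
          = xs.length - (xs.reverse.takeWhile pvWeekEmpty).length := by
        simp only [List.reverse_append, List.reverse_singleton, List.singleton_append,
          List.takeWhile_cons, hw, if_true, List.length_cons, List.length_append,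
          List.length_nil]
        omega
      rw [hK]
      exact (List.take_append_of_le_length hlen).symm
    · simp [hw, List.takeWhile_cons]

-- dropping the leading empty run does not change the trailing empty run (when some week is nonempty)
lemma trailing_run_of_drop (l : List (List (Int × Option String × Bool)))
    (h : ¬ l.all pvWeekEmpty = true) :
    ((l.drop (l.takeWhile pvWeekEmpty).length).reverse.takeWhile pvWeekEmpty).length
      = (l.reverse.takeWhile pvWeekEmpty).length := by
  have hd : l.drop (l.takeWhile pvWeekEmpty).length = l.dropWhile pvWeekEmpty := by
    nth_rewrite 2 [← List.takeWhile_append_dropWhile (p := pvWeekEmpty) (l := l)]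
    exact List.drop_left
  have hrev : l.reverse = (l.dropWhile pvWeekEmpty).reverse ++ (l.takeWhile pvWeekEmpty).reverse := by
    rw [← List.reverse_append, List.takeWhile_append_dropWhile]
  have hne : l.dropWhile pvWeekEmpty ≠ [] := by
    intro e
    have heq := List.takeWhile_append_dropWhile (p := pvWeekEmpty) (l := l)
    rw [e, List.append_nil] at heq
    have hlt := takeWhile_length_lt pvWeekEmpty l h
    rw [heq] at hlt
    omega
  have hhead := List.head_dropWhile_not pvWeekEmpty hne
  have hnotall : ¬ ((l.dropWhile pvWeekEmpty).reverse.all pvWeekEmpty = true) := by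
    intro hall
    rw [List.all_eq_true] at hall
    have := hall _ (by simp [List.head_mem] : (l.dropWhile pvWeekEmpty).head hne ∈ (l.dropWhile pvWeekEmpty).reverse)
    rw [hhead] at this
    exact Bool.false_ne_true this
  have hlt := takeWhile_length_lt pvWeekEmpty ((l.dropWhile pvWeekEmpty).reverse) hnotall
  rw [hd, hrev, List.takeWhile_append, if_neg (by omega)]

-- ===== VERDICT (by name: the statement is the Claim_ definition above) =====
theorem trim_empty_weeks_spec : Claim_equal_trim_empty_weeks := by
  intro md ts te _
  simp only [Spec_trim_empty_weeks, trim_empty_weeks, trim_empty_weeks_alt]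
  have hidx : (PySem.List.enumerate md).filterMap
      (fun p => if pvWeekHasGame p.2 then some p.1 else none) = pvIdx md 0 := rfl
  rw [hidx]
  by_cases hall : md.all pvWeekEmpty = true
  · -- every week is empty: any trimming collapses to []
    have hidx0 : pvIdx md 0 = [] := (pvIdx_eq_nil_iff md 0).mpr hall
    have htw : (md.takeWhile pvWeekEmpty) = md := List.takeWhile_eq_self_iff.mpr (by
      intro x hx; exact (List.all_eq_true.mp hall) x hx)
    have htwr : (md.reverse.takeWhile pvWeekEmpty) = md.reverse := List.takeWhile_eq_self_iff.mpr (by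
      intro x hx; exact (List.all_eq_true.mp hall) x (by simpa using hx))
    cases ts <;> cases te <;>
      simp [hidx0, trimStartLoop_eq, trimEndLoop_eq, htw, htwr,
        PySem.List.slice_zero_start, PySem.List.slice_to_natCast]
  · -- some week has a game
    have hne : pvIdx md 0 ≠ [] := fun e => hall ((pvIdx_eq_nil_iff md 0).mp e)
    have hk1 : (md.takeWhile pvWeekEmpty).length < md.length := takeWhile_length_lt _ _ hall
    have hallr : ¬ md.reverse.all pvWeekEmpty = true := by simpa using hall
    have hk2 : (md.reverse.takeWhile pvWeekEmpty).length < md.length := by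
      have := takeWhile_length_lt pvWeekEmpty md.reverse hallr
      simpa using this
    have hisEmpty : (pvIdx md 0).isEmpty = false := by
      simpa [List.isEmpty_iff] using hne
    have hhead : (pvIdx md 0).headD 0 = ((md.takeWhile pvWeekEmpty).length : Int) := by
      rw [pvIdx_headD md 0 hne]; omega
    have hlast : (pvIdx md 0).getLastD 0
        = (md.length : Int) - 1 - ((md.reverse.takeWhile pvWeekEmpty).length : Int) := by
      rw [pvIdx_getLastD md 0 hne]; omega
    have hstop : (pvIdx md 0).getLastD 0 + 1
        = ((md.length - (md.reverse.takeWhile pvWeekEmpty).length : Nat) : Int) := by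
      rw [hlast]; omega
    cases ts <;> cases te <;>
      simp only [hisEmpty, Bool.false_and, Bool.and_false, Bool.and_true, Bool.false_or,
        Bool.or_false, Bool.or_true, if_true, if_false, Bool.false_eq_true, ite_false, ite_true]
    · -- no trimming
      rw [PySem.List.slice_zero_start, PySem.List.slice_to_natCast, List.take_length]
    · -- trim_end only
      rw [hstop, trimEndLoop_eq, PySem.List.slice_zero_start, PySem.List.slice_to_natCast]
    · -- trim_start only
      rw [hhead, trimStartLoop_eq, PySem.List.slice_natCast]
      exact (List.take_of_length_le (by simp)).symm
    · -- both
      rw [hhead, hstop, trimStartLoop_eq, trimEndLoop_eq, PySem.List.slice_natCast,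
        trailing_run_of_drop md hall, List.length_drop]
      congr 1
      omega
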